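-- pv_equiv track=rewrite | github.com/vrthra/pygram | examples/t_parse.py | basic_parse
-- ===== SOURCE A (Python) =====
-- def lexical_split(mystr):
--     ltoks = mystr.split()
--     return ltoks
--
-- def basic_parse(line):
--     astr = line.replace(',','')
--     astr = astr.replace('and','')
--     tokens = lexical_split(astr)
--     dept = None
--     number = None
--     result = []
--     option = []
--     for tok in tokens:
--         if tok == 'or':
--             result.append(option)
--             option = []
--             continue
--         if tok.isalpha():
--             dept = tok
--             number = None
--         else:
--             number = tok
--         if dept and number:
--             option.append((dept,number))
--     else:
--         if option:
--             result.append(option)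
--     return result
-- ===== SOURCE B (Python) =====
-- def basic_parse(line):
--     tokens = line.replace(',', '').replace('and', '').split()
--     # phase 1: cut the token list into groups at each 'or'
--     groups = [[]]
--     for t in tokens:
--         if t == 'or':
--             groups.append([])
--         else:
--             groups[-1].append(t)
--     # phase 2: walk the groups, carrying dept/number across group boundaries
--     dept = None
--     number = None
--     result = []
--     last = len(groups) - 1
--     for i, g in enumerate(groups):
--         option = []
--         for tok in g:
--             if tok.isalpha():
--                 dept = tok
--                 number = None
--             else:
--                 number = tok
--             if dept and number:
--                 option.append((dept, number))
--         if i < last or option: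
--             result.append(option)
--     return result
-- ===== Notes on version B (the rewrite author's own statement) =====
-- stated objective: alternative
-- what changed: Replaces A's single token loop with inline 'or' handling by a two-phase decomposition: first cut the token list into groups at each 'or', then walk the groups carrying dept/number across group boundaries, appending every non-last group unconditionally and the last only if non-empty.
import Mathlib
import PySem

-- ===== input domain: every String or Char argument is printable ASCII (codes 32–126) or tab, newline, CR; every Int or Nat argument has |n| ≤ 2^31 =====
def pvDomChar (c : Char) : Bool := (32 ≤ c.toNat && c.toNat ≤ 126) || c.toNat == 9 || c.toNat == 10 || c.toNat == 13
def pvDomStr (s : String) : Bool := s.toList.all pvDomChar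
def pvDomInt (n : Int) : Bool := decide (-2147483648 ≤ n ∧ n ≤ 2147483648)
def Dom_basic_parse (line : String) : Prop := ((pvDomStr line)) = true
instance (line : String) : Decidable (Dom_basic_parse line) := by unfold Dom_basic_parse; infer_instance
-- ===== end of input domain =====

-- B re-decomposes A's single token loop into cut-at-'or' grouping plus a group walk (objective: alternative, same cost).

-- ===== PORT A =====
-- A's single for-loop over tokens, state (dept, number, result, option); 'continue' on 'or'.
def pvLoopA : List String → Option String → Option String →
    List (List (String × String)) → List (String × String) → List (List (String × String))
  | [], _, _, result, option =>
      -- for/else tail: 'if option: result.append(option)'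
      if option ≠ [] then result ++ [option] else result
  | tok :: toks, dept, number, result, option =>
      if tok = "or" then
        pvLoopA toks dept number (result ++ [option]) []
      else
        let dn := if PySem.Str.strIsalpha tok then (some tok, (none : Option String)) else (dept, some tok)
        let option := match dn.1, dn.2 with
          | some d, some n => if d ≠ "" ∧ n ≠ "" then option ++ [(d, n)] else option
          | _, _ => option
        pvLoopA toks dn.1 dn.2 result option

def basic_parse (line : String) : List (List (String × String)) :=
  let astr := PySem.Str.replace line "," ""
  let astr := PySem.Str.replace astr "and" ""
  let tokens := PySem.Str.split₀ astr
  pvLoopA tokens none none [] []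

-- ===== PORT B =====
-- phase 1: cut the token list into groups at each 'or'
def pvCut : List String → List String → List (List String)
  | [], cur => [cur]
  | t :: ts, cur => if t = "or" then cur :: pvCut ts [] else pvCut ts (cur ++ [t])

-- one group's inner loop: returns (dept, number, option)
def pvProc : List String → Option String → Option String → List (String × String) →
    Option String × Option String × List (String × String)
  | [], dept, number, option => (dept, number, option)
  | tok :: toks, dept, number, option =>
      let dn := if PySem.Str.strIsalpha tok then (some tok, (none : Option String)) else (dept, some tok)
      let option := match dn.1, dn.2 with
        | some d, some n => if d ≠ "" ∧ n ≠ "" then option ++ [(d, n)] else option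
        | _, _ => option
      pvProc toks dn.1 dn.2 option

-- phase 2: walk the groups carrying dept/number; last group appended only if non-empty
def pvLoopB : List (List String) → Option String → Option String → List (List (String × String))
  | [], _, _ => []
  | [g], d, n => let r := pvProc g d n []; if r.2.2 ≠ [] then [r.2.2] else []
  | g :: gs, d, n => let r := pvProc g d n []; r.2.2 :: pvLoopB gs r.1 r.2.1

def basic_parse_alt (line : String) : List (List (String × String)) :=
  let tokens := PySem.Str.split₀ (PySem.Str.replace (PySem.Str.replace line "," "") "and" "")
  pvLoopB (pvCut tokens []) none none

-- ===== PRECONDITION & SPEC =====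
def Spec_basic_parse (line : String) (out : List (List (String × String))) : Prop := out = basic_parse_alt line
instance (line : String) (out : List (List (String × String))) : Decidable (Spec_basic_parse line out) := by unfold Spec_basic_parse; infer_instance

-- ===== CLAIM (what is proved, stated in full; the proofs are below) =====
def Claim_equal_basic_parse : Prop := ∀ (line : String), Dom_basic_parse line → Spec_basic_parse line (basic_parse line)

-- ===== LEMMAS AND PROOFS =====

-- proof helper: pvLoopB generalized so the first group starts from a given option accumulator
def pvCont : List (List String) → Option String → Option String → List (String × String) →
    List (List (String × String))
  | [], _, _, _ => []
  | [g], d, n, opt => let r := pvProc g d n opt; if r.2.2 ≠ [] then [r.2.2] else []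
  | g :: gs, d, n, opt => let r := pvProc g d n opt; r.2.2 :: pvCont gs r.1 r.2.1 []

lemma pvCont_nil_opt : ∀ (gs : List (List String)) d n, pvCont gs d n [] = pvLoopB gs d n := by
  intro gs
  induction gs with
  | nil => intro d n; rfl
  | cons g tl ih =>
      intro d n
      cases tl with
      | nil => rfl
      | cons g2 tl2 => simp only [pvCont, pvLoopB, ih]

lemma pvCut_ne_nil : ∀ (ts : List String) c, pvCut ts c ≠ [] := by
  intro ts
  induction ts with
  | nil => intro c; simp [pvCut]
  | cons t tl ih =>
      intro c
      by_cases h : t = "or" <;> simp [pvCut, h, ih]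

lemma pvProc_append : ∀ (a b : List String) d n o,
    pvProc (a ++ b) d n o =
      pvProc b (pvProc a d n o).1 (pvProc a d n o).2.1 (pvProc a d n o).2.2 := by
  intro a
  induction a with
  | nil => intro b d n o; rfl
  | cons t tl ih => intro b d n o; simp only [List.cons_append, pvProc, ih]

lemma pvMain : ∀ (toks : List String) c d n res opt,
    pvLoopA toks (pvProc c d n opt).1 (pvProc c d n opt).2.1 res (pvProc c d n opt).2.2 =
      res ++ pvCont (pvCut toks c) d n opt := by
  intro toks
  induction toks with
  | nil =>
      intro c d n res opt
      simp only [pvLoopA, pvCut, pvCont]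
      split <;> simp
  | cons t ts ih =>
      intro c d n res opt
      by_cases ht : t = "or"
      · subst ht
        obtain ⟨g, gs, hg⟩ : ∃ g gs, pvCut ts [] = g :: gs := by
          cases h : pvCut ts ([] : List String) with
          | nil => exact absurd h (pvCut_ne_nil ts [])
          | cons g gs => exact ⟨g, gs, rfl⟩
        have h1 := ih [] (pvProc c d n opt).1 (pvProc c d n opt).2.1 (res ++ [(pvProc c d n opt).2.2]) []
        simp only [pvProc] at h1
        have h2 : pvCut ("or" :: ts) c = c :: g :: gs := by simp [pvCut, hg]
        rw [hg] at h1
        simp only [pvLoopA, h1, h2, pvCont]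
        simp [List.append_assoc]
      · have hstep : pvLoopA (t :: ts) (pvProc c d n opt).1 (pvProc c d n opt).2.1 res (pvProc c d n opt).2.2 =
            pvLoopA ts (pvProc (c ++ [t]) d n opt).1 (pvProc (c ++ [t]) d n opt).2.1 res
              (pvProc (c ++ [t]) d n opt).2.2 := by
          rw [pvProc_append]
          simp only [pvLoopA, pvProc, if_neg ht]
        rw [hstep, ih (c ++ [t]) d n res opt]
        simp only [pvCut, if_neg ht]

-- ===== VERDICT (by name: the statement is the Claim_ definition above) =====
theorem basic_parse_spec : Claim_equal_basic_parse := by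
  intro line _
  unfold Spec_basic_parse basic_parse basic_parse_alt
  have h := pvMain (PySem.Str.split₀ (PySem.Str.replace (PySem.Str.replace line "," "") "and" ""))
    [] none none [] []
  simp only [pvProc] at h
  simp only [h, pvCont_nil_opt, List.nil_append]
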